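-- pv_equiv track=rewrite | github.com/ashensn0w/Emotion-Recognition-System | backend/preprocessing/narrative_features.py | extract_appearance
-- ===== SOURCE A (Python) =====
-- def extract_appearance(text):
--     appearance_indicators = [
--         'looks', 'appears', 'seems', 'seem', 'shows', 'exhibits',
--         'displays', 'manifests', 'presents', 'exudes', 'reveals',
--         'reflects', 'indicates', 'nagpakita', 'nagsilbing', 'nagmumungkahi',
--         'nagpapakita', 'nagpapamalas', 'nagpapahayag', 'nagbubukas',
--         'nagbibigay', 'nagsasalita', 'nag-aalok', 'naglalaman', 'nagsasabi',
--         'nagsusumpa', 'nag-aangkin', 'nagpapakita ng', 'nagpapahayag ng',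
--         'naglalantad ng', 'nagsasalita ng', 'nag-aalok ng', 'naglalaman ng',
--         'nagpapatunay ng', 'nagpapakita ng', 'nagpapahayag ng', 'naglalantad ng'
--     ]
--     return int(any(indicator in text for indicator in appearance_indicators))
-- ===== SOURCE B (Python) =====
-- def extract_appearance(text):
--     indicators = (
--         'looks|appears|seems|seem|shows|exhibits|displays|manifests|presents|'
--         'exudes|reveals|reflects|indicates|nagpakita|nagsilbing|nagmumungkahi|'
--         'nagpapakita|nagpapamalas|nagpapahayag|nagbubukas|nagbibigay|'
--         'nagsasalita|nag-aalok|naglalaman|nagsasabi|nagsusumpa|nag-aangkin|'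
--         'nagpapakita ng|nagpapahayag ng|naglalantad ng|nagsasalita ng|'
--         'nag-aalok ng|naglalaman ng|nagpapatunay ng|nagpapakita ng|'
--         'nagpapahayag ng|naglalantad ng'
--     ).split('|')
--     vocab = set(indicators)
--     lengths = sorted({len(p) for p in indicators})
--     # window scan: at each position, test whether a window of an indicator
--     # length is itself an indicator (set membership instead of substring search)
--     for i in range(len(text) + 1):
--         for L in lengths:
--             if text[i:i + L] in vocab:
--                 return 1
--     return 0
-- ===== Notes on version B (the rewrite author's own statement) =====
-- stated objective: alternative
-- what changed: A runs a separate whole-text substring search for each of the 37 indicators; B builds a set of the indicators and the sorted distinct indicator lengths once, then makes a single left-to-right position scan that tests whether the window of each indicator length at the position is a member of the set, so no per-pattern substring search remains.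
import Mathlib
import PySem

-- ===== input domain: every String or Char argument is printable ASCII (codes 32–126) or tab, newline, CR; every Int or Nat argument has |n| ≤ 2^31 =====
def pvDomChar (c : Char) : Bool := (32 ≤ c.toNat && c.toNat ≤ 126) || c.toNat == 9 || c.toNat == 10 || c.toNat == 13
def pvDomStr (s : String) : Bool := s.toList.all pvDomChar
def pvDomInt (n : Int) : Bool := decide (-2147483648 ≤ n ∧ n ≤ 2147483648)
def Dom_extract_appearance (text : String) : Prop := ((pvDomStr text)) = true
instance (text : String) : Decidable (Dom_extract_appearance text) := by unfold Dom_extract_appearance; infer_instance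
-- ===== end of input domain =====

-- B replaces A's per-indicator substring searches by a position scan that tests, for each
-- distinct indicator length, whether the window of that length at the position is a member
-- of a set of the indicators (alternative decomposition; not claimed faster).

-- ===== PORT A =====
def pvIndicators : List String := [
    "looks", "appears", "seems", "seem", "shows", "exhibits",
    "displays", "manifests", "presents", "exudes", "reveals",
    "reflects", "indicates", "nagpakita", "nagsilbing", "nagmumungkahi",
    "nagpapakita", "nagpapamalas", "nagpapahayag", "nagbubukas",
    "nagbibigay", "nagsasalita", "nag-aalok", "naglalaman", "nagsasabi",
    "nagsusumpa", "nag-aangkin", "nagpapakita ng", "nagpapahayag ng",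
    "naglalantad ng", "nagsasalita ng", "nag-aalok ng", "naglalaman ng",
    "nagpapatunay ng", "nagpapakita ng", "nagpapahayag ng", "naglalantad ng"]

-- int(any(indicator in text for indicator in appearance_indicators))
def extract_appearance (text : String) : Int :=
  if pvIndicators.any (fun indicator => PySem.Str.isIn indicator text) then 1 else 0

-- ===== PORT B =====
-- Source B's '…'.split('|'); the separator is the nonempty literal "|", so split? is `some`
def pvAltData : String := "looks|appears|seems|seem|shows|exhibits|displays|manifests|presents|exudes|reveals|reflects|indicates|nagpakita|nagsilbing|nagmumungkahi|nagpapakita|nagpapamalas|nagpapahayag|nagbubukas|nagbibigay|nagsasalita|nag-aalok|naglalaman|nagsasabi|nagsusumpa|nag-aangkin|nagpapakita ng|nagpapahayag ng|naglalantad ng|nagsasalita ng|nag-aalok ng|naglalaman ng|nagpapatunay ng|nagpapakita ng|nagpapahayag ng|naglalantad ng"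

def pvAltIndicators : List String := (PySem.Str.split? pvAltData "|").getD []

-- vocab = set(indicators)
def pvAltVocab : PySem.Set String := PySem.Set.ofList pvAltIndicators

-- lengths = sorted({len(p) for p in indicators})
def pvAltLengths : List Int :=
  PySem.List.sorted (PySem.Set.ofList (pvAltIndicators.map PySem.Str.len)) (fun x => x) false

-- the loop 'for i in range(len(text)+1): for L in lengths: if text[i:i+L] in vocab: return 1'
-- as structural recursion over the suffixes of the text; text[i:i+L] is the slice [:L] of the suffix
def pvWindowHit (vocab : PySem.Set String) (lengths : List Int) (s : List Char) : Bool :=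
  lengths.any
    (fun L => PySem.Set.contains vocab (String.ofList (PySem.List.slice s none (some L))))

def pvWindowScan (vocab : PySem.Set String) (lengths : List Int) (s : List Char) : Bool :=
  if pvWindowHit vocab lengths s then
    true
  else
    match s with
    | [] => false
    | _ :: t => pvWindowScan vocab lengths t

def extract_appearance_alt (text : String) : Int :=
  if pvWindowScan pvAltVocab pvAltLengths text.toList then 1 else 0

-- ===== PRECONDITION & SPEC =====
def Spec_extract_appearance (text : String) (out : Int) : Prop := out = extract_appearance_alt text
instance (text : String) (out : Int) : Decidable (Spec_extract_appearance text out) := by unfold Spec_extract_appearance; infer_instance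

-- ===== CLAIM =====
def Claim_equal_extract_appearance : Prop := ∀ (text : String), Dom_extract_appearance text → Spec_extract_appearance text (extract_appearance text)

-- ===== LEMMAS AND PROOFS =====

-- the split of the joined literal is exactly A's literal list
set_option maxRecDepth 8192 in
theorem pvAlt_eq : pvAltIndicators = pvIndicators := by decide

-- every indicator's length is among the distinct sorted lengths
theorem pvLen_mem (p : String) (hp : p ∈ pvIndicators) :
    (PySem.Str.len p) ∈ pvAltLengths := by
  unfold pvAltLengths
  rw [pvAlt_eq, PySem.List.mem_sorted, PySem.Set.mem_ofList]
  exact List.mem_map.mpr ⟨p, hp, rfl⟩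

theorem pvLen_nonneg (L : Int) (hL : L ∈ pvAltLengths) : 0 ≤ L := by
  unfold pvAltLengths at hL
  rw [pvAlt_eq, PySem.List.mem_sorted, PySem.Set.mem_ofList] at hL
  obtain ⟨p, _, rfl⟩ := List.mem_map.mp hL
  simp [PySem.Str.len_eq]

-- the inner 'any L' test at one position holds iff some indicator starts there
theorem pvWindowHit_iff (s : List Char) :
    pvWindowHit pvAltVocab pvAltLengths s = true ↔ ∃ p ∈ pvIndicators, p.toList <+: s := by
  unfold pvWindowHit
  constructor
  · intro h
    obtain ⟨L, hL, hc⟩ := List.any_eq_true.mp h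
    have hmem : String.ofList (PySem.List.slice s none (some L)) ∈ pvIndicators := by
      have := (PySem.Set.contains_iff _ _).mp hc
      rwa [pvAltVocab, PySem.Set.mem_ofList, pvAlt_eq] at this
    refine ⟨_, hmem, ?_⟩
    rw [PySem.List.slice_to _ (pvLen_nonneg L hL)]
    simp [List.take_prefix]
  · rintro ⟨p, hp, hpre⟩
    refine List.any_eq_true.mpr ⟨PySem.Str.len p, pvLen_mem p hp, ?_⟩
    have h0 : (0:Int) ≤ PySem.Str.len p := by simp [PySem.Str.len_eq]
    rw [PySem.List.slice_to _ h0]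
    have htake : s.take p.toList.length = p.toList := (List.prefix_iff_eq_take.mp hpre).symm
    have : s.take (PySem.Str.len p).toNat = p.toList := by
      simpa [PySem.Str.len_eq] using htake
    rw [this]
    refine (PySem.Set.contains_iff _ _).mpr ?_
    rw [pvAltVocab, PySem.Set.mem_ofList, pvAlt_eq]
    simpa using hp

set_option maxRecDepth 16384 in
theorem pvWindowScan_iff (s : List Char) :
    pvWindowScan pvAltVocab pvAltLengths s = true ↔ ∃ p ∈ pvIndicators, ∃ j, p.toList <+: s.drop j := by
  induction s with
  | nil =>
    rw [pvWindowScan]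
    constructor
    · intro h
      split at h
      · rename_i hc
        obtain ⟨p, hp, hpre⟩ := (pvWindowHit_iff []).mp hc
        exact ⟨p, hp, 0, hpre⟩
      · cases h
    · rintro ⟨p, hp, j, hpre⟩
      simp only [List.drop_nil] at hpre
      rw [if_pos ((pvWindowHit_iff []).mpr ⟨p, hp, hpre⟩)]
  | cons c t ih =>
    rw [pvWindowScan]
    constructor
    · intro h
      split at h
      · rename_i hc
        obtain ⟨p, hp, hpre⟩ := (pvWindowHit_iff (c :: t)).mp hc
        exact ⟨p, hp, 0, hpre⟩
      · obtain ⟨p, hp, j, hpre⟩ := ih.mp h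
        exact ⟨p, hp, j + 1, by simpa using hpre⟩
    · rintro ⟨p, hp, j, hpre⟩
      by_cases hc : pvWindowHit pvAltVocab pvAltLengths (c :: t) = true
      · rw [if_pos hc]
      · rw [if_neg hc]
        cases j with
        | zero =>
          exact absurd ((pvWindowHit_iff (c :: t)).mpr ⟨p, hp, by simpa using hpre⟩) hc
        | succ j =>
          exact ih.mpr ⟨p, hp, j, by simpa using hpre⟩

theorem pvAny_eq_scan (text : String) :
    pvIndicators.any (fun indicator => PySem.Str.isIn indicator text) = pvWindowScan pvAltVocab pvAltLengths text.toList := by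
  rcases hb : pvWindowScan pvAltVocab pvAltLengths text.toList with _ | _
  · rw [List.any_eq_false]
    intro p hp
    rw [Bool.not_eq_true, ← Bool.not_eq_true]
    intro hin
    have : ∃ j, p.toList <+: text.toList.drop j :=
      (PySem.Chars.exists_prefix_drop_iff_isIn p.toList text.toList).mpr
        ((PySem.Chars.isIn_iff_infix _ _).mpr ((PySem.Str.isIn_iff_infix _ _).mp hin))
    obtain ⟨j, hpre⟩ := this
    have := (pvWindowScan_iff text.toList).mpr ⟨p, hp, j, hpre⟩
    rw [hb] at this; cases this
  · obtain ⟨p, hp, j, hpre⟩ := (pvWindowScan_iff text.toList).mp hb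
    refine List.any_eq_true.mpr ⟨p, hp, ?_⟩
    exact (PySem.Str.isIn_iff_infix _ _).mpr
      ((PySem.Chars.isIn_iff_infix _ _).mp
        ((PySem.Chars.exists_prefix_drop_iff_isIn _ _).mp ⟨j, hpre⟩))

-- ===== VERDICT =====
theorem extract_appearance_spec : Claim_equal_extract_appearance := by
  intro text _
  unfold Spec_extract_appearance extract_appearance extract_appearance_alt
  rw [pvAny_eq_scan]
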